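-- pv_equiv track=rewrite | github.com/phpbhaiya/fazri-analyzer | backend/services/alerts/assignment_engine.py | _get_adjacent_zones_static
-- ===== SOURCE A (Python) =====
-- from typing import Optional, List, Dict, Any, Tuple
--
-- ZONE_ADJACENCY = {
--     "LIB_ENT": ["CAF_01", "ADMIN_LOBBY", "AUDITORIUM"],
--     "LAB_101": ["LAB_102", "LAB_305", "ADMIN_LOBBY"],
--     "LAB_102": ["LAB_101", "LAB_305"],
--     "LAB_305": ["LAB_101", "LAB_102"],
--     "CAF_01": ["LIB_ENT", "GYM", "AUDITORIUM"],
--     "GYM": ["CAF_01", "HOSTEL_GATE"],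
--     "HOSTEL_GATE": ["GYM", "ADMIN_LOBBY"],
--     "ADMIN_LOBBY": ["LIB_ENT", "LAB_101", "HOSTEL_GATE", "SEM_01"],
--     "AUDITORIUM": ["LIB_ENT", "CAF_01", "SEM_01"],
--     "SEM_01": ["ADMIN_LOBBY", "AUDITORIUM", "ROOM_A1"],
--     "ROOM_A1": ["ROOM_A2", "SEM_01"],
--     "ROOM_A2": ["ROOM_A1"],
-- }
--
-- def _get_adjacent_zones_static(zone_id: str, max_distance: int) -> List[str]:
--     """Get adjacent zones from static map using BFS"""
--     if zone_id not in ZONE_ADJACENCY: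
--         return []
--
--     visited = {zone_id}
--     result = []
--     current_level = [zone_id]
--
--     for distance in range(1, max_distance + 1):
--         next_level = []
--         for zone in current_level:
--             for adjacent in ZONE_ADJACENCY.get(zone, []):
--                 if adjacent not in visited:
--                     visited.add(adjacent)
--                     next_level.append(adjacent)
--                     result.append(adjacent)
--         current_level = next_level
--         if not current_level:
--             break
--
--     return result
-- ===== SOURCE B (Python) =====
-- # The adjacency map is a static module constant, so the whole BFS is precomputed once:
-- # BFS_ORDER[z] lists every other zone in A's exact discovery order, annotated with its
-- # BFS distance from z.  A call is then just a lookup plus a prefix filter on distance.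
-- BFS_ORDER = {
--     'LIB_ENT': [('CAF_01', 1), ('ADMIN_LOBBY', 1), ('AUDITORIUM', 1), ('GYM', 2), ('LAB_101', 2), ('HOSTEL_GATE', 2), ('SEM_01', 2), ('LAB_102', 3), ('LAB_305', 3), ('ROOM_A1', 3), ('ROOM_A2', 4)],
--     'LAB_101': [('LAB_102', 1), ('LAB_305', 1), ('ADMIN_LOBBY', 1), ('LIB_ENT', 2), ('HOSTEL_GATE', 2), ('SEM_01', 2), ('CAF_01', 3), ('AUDITORIUM', 3), ('GYM', 3), ('ROOM_A1', 3), ('ROOM_A2', 4)],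
--     'LAB_102': [('LAB_101', 1), ('LAB_305', 1), ('ADMIN_LOBBY', 2), ('LIB_ENT', 3), ('HOSTEL_GATE', 3), ('SEM_01', 3), ('CAF_01', 4), ('AUDITORIUM', 4), ('GYM', 4), ('ROOM_A1', 4), ('ROOM_A2', 5)],
--     'LAB_305': [('LAB_101', 1), ('LAB_102', 1), ('ADMIN_LOBBY', 2), ('LIB_ENT', 3), ('HOSTEL_GATE', 3), ('SEM_01', 3), ('CAF_01', 4), ('AUDITORIUM', 4), ('GYM', 4), ('ROOM_A1', 4), ('ROOM_A2', 5)],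
--     'CAF_01': [('LIB_ENT', 1), ('GYM', 1), ('AUDITORIUM', 1), ('ADMIN_LOBBY', 2), ('HOSTEL_GATE', 2), ('SEM_01', 2), ('LAB_101', 3), ('ROOM_A1', 3), ('LAB_102', 4), ('LAB_305', 4), ('ROOM_A2', 4)],
--     'GYM': [('CAF_01', 1), ('HOSTEL_GATE', 1), ('LIB_ENT', 2), ('AUDITORIUM', 2), ('ADMIN_LOBBY', 2), ('SEM_01', 3), ('LAB_101', 3), ('ROOM_A1', 4), ('LAB_102', 4), ('LAB_305', 4), ('ROOM_A2', 5)],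
--     'HOSTEL_GATE': [('GYM', 1), ('ADMIN_LOBBY', 1), ('CAF_01', 2), ('LIB_ENT', 2), ('LAB_101', 2), ('SEM_01', 2), ('AUDITORIUM', 3), ('LAB_102', 3), ('LAB_305', 3), ('ROOM_A1', 3), ('ROOM_A2', 4)],
--     'ADMIN_LOBBY': [('LIB_ENT', 1), ('LAB_101', 1), ('HOSTEL_GATE', 1), ('SEM_01', 1), ('CAF_01', 2), ('AUDITORIUM', 2), ('LAB_102', 2), ('LAB_305', 2), ('GYM', 2), ('ROOM_A1', 2), ('ROOM_A2', 3)],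
--     'AUDITORIUM': [('LIB_ENT', 1), ('CAF_01', 1), ('SEM_01', 1), ('ADMIN_LOBBY', 2), ('GYM', 2), ('ROOM_A1', 2), ('LAB_101', 3), ('HOSTEL_GATE', 3), ('ROOM_A2', 3), ('LAB_102', 4), ('LAB_305', 4)],
--     'SEM_01': [('ADMIN_LOBBY', 1), ('AUDITORIUM', 1), ('ROOM_A1', 1), ('LIB_ENT', 2), ('LAB_101', 2), ('HOSTEL_GATE', 2), ('CAF_01', 2), ('ROOM_A2', 2), ('LAB_102', 3), ('LAB_305', 3), ('GYM', 3)],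
--     'ROOM_A1': [('ROOM_A2', 1), ('SEM_01', 1), ('ADMIN_LOBBY', 2), ('AUDITORIUM', 2), ('LIB_ENT', 3), ('LAB_101', 3), ('HOSTEL_GATE', 3), ('CAF_01', 3), ('LAB_102', 4), ('LAB_305', 4), ('GYM', 4)],
--     'ROOM_A2': [('ROOM_A1', 1), ('SEM_01', 2), ('ADMIN_LOBBY', 3), ('AUDITORIUM', 3), ('LIB_ENT', 4), ('LAB_101', 4), ('HOSTEL_GATE', 4), ('CAF_01', 4), ('LAB_102', 5), ('LAB_305', 5), ('GYM', 5)],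
-- }
--
-- def _get_adjacent_zones_static(zone_id: str, max_distance: int):
--     """Get adjacent zones from a precomputed BFS-order distance table."""
--     return [zone for zone, dist in BFS_ORDER.get(zone_id, []) if dist <= max_distance]
-- ===== Notes on version B (the rewrite author's own statement) =====
-- stated objective: alternative
-- what changed: Replaces the runtime level-by-level BFS traversal (visited set, frontier lists) with a lookup into a precomputed distance-annotated BFS-order table of the static adjacency map, so a call is just a dict lookup plus a filter on distance.
import Mathlib
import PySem

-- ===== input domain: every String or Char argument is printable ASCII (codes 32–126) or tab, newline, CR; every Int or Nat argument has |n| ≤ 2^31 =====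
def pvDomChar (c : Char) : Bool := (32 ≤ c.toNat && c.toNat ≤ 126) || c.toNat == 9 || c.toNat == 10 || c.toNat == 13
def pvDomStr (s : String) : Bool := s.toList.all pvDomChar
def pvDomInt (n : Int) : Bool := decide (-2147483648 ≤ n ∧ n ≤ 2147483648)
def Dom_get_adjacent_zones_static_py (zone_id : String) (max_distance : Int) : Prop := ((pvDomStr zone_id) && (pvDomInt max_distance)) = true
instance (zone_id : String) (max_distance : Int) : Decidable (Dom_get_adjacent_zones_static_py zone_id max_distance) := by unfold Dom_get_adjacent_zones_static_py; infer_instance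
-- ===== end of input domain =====

-- B replaces A's level-by-level BFS traversal with a lookup in a precomputed distance-annotated
-- BFS-order table of the static map (the graph is a module constant), then a distance filter.

-- ===== PORT A =====
def ZONE_ADJACENCY : PySem.Dict String (List String) := PySem.Dict.mk [
  ("LIB_ENT", ["CAF_01", "ADMIN_LOBBY", "AUDITORIUM"]),
  ("LAB_101", ["LAB_102", "LAB_305", "ADMIN_LOBBY"]),
  ("LAB_102", ["LAB_101", "LAB_305"]),
  ("LAB_305", ["LAB_101", "LAB_102"]),
  ("CAF_01", ["LIB_ENT", "GYM", "AUDITORIUM"]),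
  ("GYM", ["CAF_01", "HOSTEL_GATE"]),
  ("HOSTEL_GATE", ["GYM", "ADMIN_LOBBY"]),
  ("ADMIN_LOBBY", ["LIB_ENT", "LAB_101", "HOSTEL_GATE", "SEM_01"]),
  ("AUDITORIUM", ["LIB_ENT", "CAF_01", "SEM_01"]),
  ("SEM_01", ["ADMIN_LOBBY", "AUDITORIUM", "ROOM_A1"]),
  ("ROOM_A1", ["ROOM_A2", "SEM_01"]),
  ("ROOM_A2", ["ROOM_A1"])]

-- inner body of A's level loop: for zone in current_level: for adjacent in ...: if not visited: append
-- state = (next_level, visited, result)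
def stepA (st : List String × PySem.Set String × List String) (zone : String) :
    List String × PySem.Set String × List String :=
  (PySem.Dict.getD ZONE_ADJACENCY zone []).foldl (fun st adjacent =>
    if PySem.Set.contains st.2.1 adjacent then st
    else (st.1 ++ [adjacent], PySem.Set.add st.2.1 adjacent, st.2.2 ++ [adjacent])) st

-- A's 'for distance in range(1, max_distance + 1)' loop; fuel = number of remaining iterations
def loopA : Nat → List String → PySem.Set String → List String → List String
  | 0, _, _, result => result
  | n + 1, current_level, visited, result =>
    let st := current_level.foldl stepA ([], visited, result)
    if st.1 = [] then st.2.2 else loopA n st.1 st.2.1 st.2.2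

def get_adjacent_zones_static_py (zone_id : String) (max_distance : Int) : List String :=
  if PySem.Dict.contains ZONE_ADJACENCY zone_id = false then []
  else loopA max_distance.toNat [zone_id] (PySem.Set.ofList [zone_id]) []

-- ===== PORT B =====
-- BFS_ORDER[z]: every other zone in discovery order, annotated with its BFS distance from z
def BFS_ORDER : PySem.Dict String (List (String × Int)) := PySem.Dict.mk [
  ("LIB_ENT", [("CAF_01", 1), ("ADMIN_LOBBY", 1), ("AUDITORIUM", 1), ("GYM", 2), ("LAB_101", 2), ("HOSTEL_GATE", 2), ("SEM_01", 2), ("LAB_102", 3), ("LAB_305", 3), ("ROOM_A1", 3), ("ROOM_A2", 4)]),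
  ("LAB_101", [("LAB_102", 1), ("LAB_305", 1), ("ADMIN_LOBBY", 1), ("LIB_ENT", 2), ("HOSTEL_GATE", 2), ("SEM_01", 2), ("CAF_01", 3), ("AUDITORIUM", 3), ("GYM", 3), ("ROOM_A1", 3), ("ROOM_A2", 4)]),
  ("LAB_102", [("LAB_101", 1), ("LAB_305", 1), ("ADMIN_LOBBY", 2), ("LIB_ENT", 3), ("HOSTEL_GATE", 3), ("SEM_01", 3), ("CAF_01", 4), ("AUDITORIUM", 4), ("GYM", 4), ("ROOM_A1", 4), ("ROOM_A2", 5)]),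
  ("LAB_305", [("LAB_101", 1), ("LAB_102", 1), ("ADMIN_LOBBY", 2), ("LIB_ENT", 3), ("HOSTEL_GATE", 3), ("SEM_01", 3), ("CAF_01", 4), ("AUDITORIUM", 4), ("GYM", 4), ("ROOM_A1", 4), ("ROOM_A2", 5)]),
  ("CAF_01", [("LIB_ENT", 1), ("GYM", 1), ("AUDITORIUM", 1), ("ADMIN_LOBBY", 2), ("HOSTEL_GATE", 2), ("SEM_01", 2), ("LAB_101", 3), ("ROOM_A1", 3), ("LAB_102", 4), ("LAB_305", 4), ("ROOM_A2", 4)]),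
  ("GYM", [("CAF_01", 1), ("HOSTEL_GATE", 1), ("LIB_ENT", 2), ("AUDITORIUM", 2), ("ADMIN_LOBBY", 2), ("SEM_01", 3), ("LAB_101", 3), ("ROOM_A1", 4), ("LAB_102", 4), ("LAB_305", 4), ("ROOM_A2", 5)]),
  ("HOSTEL_GATE", [("GYM", 1), ("ADMIN_LOBBY", 1), ("CAF_01", 2), ("LIB_ENT", 2), ("LAB_101", 2), ("SEM_01", 2), ("AUDITORIUM", 3), ("LAB_102", 3), ("LAB_305", 3), ("ROOM_A1", 3), ("ROOM_A2", 4)]),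
  ("ADMIN_LOBBY", [("LIB_ENT", 1), ("LAB_101", 1), ("HOSTEL_GATE", 1), ("SEM_01", 1), ("CAF_01", 2), ("AUDITORIUM", 2), ("LAB_102", 2), ("LAB_305", 2), ("GYM", 2), ("ROOM_A1", 2), ("ROOM_A2", 3)]),
  ("AUDITORIUM", [("LIB_ENT", 1), ("CAF_01", 1), ("SEM_01", 1), ("ADMIN_LOBBY", 2), ("GYM", 2), ("ROOM_A1", 2), ("LAB_101", 3), ("HOSTEL_GATE", 3), ("ROOM_A2", 3), ("LAB_102", 4), ("LAB_305", 4)]),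
  ("SEM_01", [("ADMIN_LOBBY", 1), ("AUDITORIUM", 1), ("ROOM_A1", 1), ("LIB_ENT", 2), ("LAB_101", 2), ("HOSTEL_GATE", 2), ("CAF_01", 2), ("ROOM_A2", 2), ("LAB_102", 3), ("LAB_305", 3), ("GYM", 3)]),
  ("ROOM_A1", [("ROOM_A2", 1), ("SEM_01", 1), ("ADMIN_LOBBY", 2), ("AUDITORIUM", 2), ("LIB_ENT", 3), ("LAB_101", 3), ("HOSTEL_GATE", 3), ("CAF_01", 3), ("LAB_102", 4), ("LAB_305", 4), ("GYM", 4)]),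
  ("ROOM_A2", [("ROOM_A1", 1), ("SEM_01", 2), ("ADMIN_LOBBY", 3), ("AUDITORIUM", 3), ("LIB_ENT", 4), ("LAB_101", 4), ("HOSTEL_GATE", 4), ("CAF_01", 4), ("LAB_102", 5), ("LAB_305", 5), ("GYM", 5)])]

-- the comprehension [zone for zone, dist in BFS_ORDER.get(zone_id, []) if dist <= max_distance]
def get_adjacent_zones_static_py_alt (zone_id : String) (max_distance : Int) : List String :=
  ((PySem.Dict.getD BFS_ORDER zone_id []).filter (fun p => p.2 ≤ max_distance)).map Prod.fst

-- ===== PRECONDITION & SPEC =====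
def Spec_get_adjacent_zones_static_py (zone_id : String) (max_distance : Int) (out : List String) : Prop := out = get_adjacent_zones_static_py_alt zone_id max_distance
instance (zone_id : String) (max_distance : Int) (out : List String) : Decidable (Spec_get_adjacent_zones_static_py zone_id max_distance out) := by unfold Spec_get_adjacent_zones_static_py; infer_instance

-- ===== CLAIM (what is proved, stated in full; the proofs are below) =====
def Claim_equal_get_adjacent_zones_static_py : Prop := ∀ (zone_id : String) (max_distance : Int), Dom_get_adjacent_zones_static_py zone_id max_distance → Spec_get_adjacent_zones_static_py zone_id max_distance (get_adjacent_zones_static_py zone_id max_distance)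

-- ===== LEMMAS AND PROOFS =====

def ZONE_KEYS : List String := ZONE_ADJACENCY.keys

-- every adjacency value is itself a key of the map
lemma adj_sub_keys (z a : String) (h : a ∈ PySem.Dict.getD ZONE_ADJACENCY z []) : a ∈ ZONE_KEYS := by
  rcases hg : PySem.Dict.get? ZONE_ADJACENCY z with _ | vs
  · simp [PySem.Dict.getD_eq_get?_getD, hg] at h
  · simp only [PySem.Dict.getD_eq_get?_getD, hg, Option.getD_some] at h
    have hm := PySem.Dict.mem_items_of_get?_eq_some _ hg
    simp [ZONE_ADJACENCY, Prod.ext_iff] at hm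
    rcases hm with ⟨_, rfl⟩ | ⟨_, rfl⟩ | ⟨_, rfl⟩ | ⟨_, rfl⟩ | ⟨_, rfl⟩ | ⟨_, rfl⟩ | ⟨_, rfl⟩ |
      ⟨_, rfl⟩ | ⟨_, rfl⟩ | ⟨_, rfl⟩ | ⟨_, rfl⟩ | ⟨_, rfl⟩ <;> fin_cases h <;> decide

-- number of keys not yet visited
def uncov (v : PySem.Set String) : Nat := ZONE_KEYS.countP (fun k => !(PySem.Set.contains v k))

lemma contains_add_of_contains (v : PySem.Set String) (x y : String)
    (h : PySem.Set.contains v x = true) : PySem.Set.contains (PySem.Set.add v y) x = true := by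
  unfold PySem.Set.add
  split
  · exact h
  · simp [PySem.Set.contains] at h ⊢
    exact Or.inl h

lemma countP_strict {α : Type} (l : List α) (p q : α → Bool)
    (hmono : ∀ a ∈ l, p a = true → q a = true) (x : α) (hx : x ∈ l)
    (hqx : q x = true) (hpx : p x = false) : l.countP p < l.countP q := by
  induction l with
  | nil => simp at hx
  | cons b t ih =>
    have hmt : ∀ a ∈ t, p a = true → q a = true := fun a ha => hmono a (List.mem_cons_of_mem _ ha)
    have hle : t.countP p ≤ t.countP q := List.countP_mono_left hmt
    rcases List.mem_cons.mp hx with rfl | hx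
    · simp [hqx, hpx]
      omega
    · have := ih hmt hx
      by_cases hb : p b = true
      · simp only [List.countP_cons, hb, hmono b List.mem_cons_self hb]
        omega
      · simp only [List.countP_cons, Bool.not_eq_true] at *
        rcases hq : q b <;> simp [hb] <;> omega

-- invariant of the inner (adjacency) fold used by stepA: visited grows, and every zone put in
-- next_level is a key, was unvisited before, and is visited afterwards
lemma foldA_inv (l : List String) (hl : ∀ a ∈ l, a ∈ ZONE_KEYS) (v0 : PySem.Set String) :
    ∀ (st : List String × PySem.Set String × List String),
    (∀ x, PySem.Set.contains v0 x = true → PySem.Set.contains st.2.1 x = true) →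
    (∀ p ∈ st.1, PySem.Set.contains v0 p = false ∧ PySem.Set.contains st.2.1 p = true ∧ p ∈ ZONE_KEYS) →
    (∀ x, PySem.Set.contains v0 x = true →
      PySem.Set.contains (l.foldl (fun st adjacent =>
        if PySem.Set.contains st.2.1 adjacent then st
        else (st.1 ++ [adjacent], PySem.Set.add st.2.1 adjacent, st.2.2 ++ [adjacent])) st).2.1 x = true) ∧
    (∀ p ∈ (l.foldl (fun st adjacent =>
        if PySem.Set.contains st.2.1 adjacent then st
        else (st.1 ++ [adjacent], PySem.Set.add st.2.1 adjacent, st.2.2 ++ [adjacent])) st).1,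
      PySem.Set.contains v0 p = false ∧
      PySem.Set.contains (l.foldl (fun st adjacent =>
        if PySem.Set.contains st.2.1 adjacent then st
        else (st.1 ++ [adjacent], PySem.Set.add st.2.1 adjacent, st.2.2 ++ [adjacent])) st).2.1 p = true ∧
      p ∈ ZONE_KEYS) := by
  induction l with
  | nil => intro st hmono hnext; exact ⟨hmono, hnext⟩
  | cons a t ih =>
    intro st hmono hnext
    have hak : a ∈ ZONE_KEYS := hl a List.mem_cons_self
    have hst : ∀ b ∈ t, b ∈ ZONE_KEYS := fun b hb => hl b (List.mem_cons_of_mem _ hb)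
    simp only [List.foldl_cons]
    by_cases hc : PySem.Set.contains st.2.1 a = true
    · simp only [hc, if_true]
      exact ih hst st hmono hnext
    · simp only [hc, Bool.false_eq_true, if_false]
      apply ih hst
      · intro x hx
        exact contains_add_of_contains _ _ _ (hmono x hx)
      · intro p hp
        rcases List.mem_append.mp hp with hp | hp
        · obtain ⟨h1, h2, h3⟩ := hnext p hp
          exact ⟨h1, contains_add_of_contains _ _ _ h2, h3⟩
        · simp only [List.mem_singleton] at hp
          subst hp
          refine ⟨?_, ?_, hak⟩
          · rcases hv : PySem.Set.contains v0 p with _ | _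
            · rfl
            · exact absurd (hmono p hv) hc
          · unfold PySem.Set.add
            have hpm : p ∉ st.2.1 := by simpa using hc
            simp [PySem.Set.contains, hpm]

-- the same invariant through a whole BFS level (outer fold over current_level)
lemma levelA_inv (current : List String) (v0 : PySem.Set String) :
    ∀ (st : List String × PySem.Set String × List String),
    (∀ x, PySem.Set.contains v0 x = true → PySem.Set.contains st.2.1 x = true) →
    (∀ p ∈ st.1, PySem.Set.contains v0 p = false ∧ PySem.Set.contains st.2.1 p = true ∧ p ∈ ZONE_KEYS) →
    (∀ x, PySem.Set.contains v0 x = true → PySem.Set.contains (current.foldl stepA st).2.1 x = true) ∧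
    (∀ p ∈ (current.foldl stepA st).1, PySem.Set.contains v0 p = false ∧
      PySem.Set.contains (current.foldl stepA st).2.1 p = true ∧ p ∈ ZONE_KEYS) := by
  induction current with
  | nil => intro st hmono hnext; exact ⟨hmono, hnext⟩
  | cons z t ih =>
    intro st hmono hnext
    simp only [List.foldl_cons]
    obtain ⟨h1, h2⟩ := foldA_inv (PySem.Dict.getD ZONE_ADJACENCY z []) (fun a ha => adj_sub_keys z a ha)
      v0 st hmono hnext
    exact ih _ h1 h2

-- fuel beyond uncov+1 is irrelevant for loopA
lemma loopA_fuel_congr (u : Nat) : ∀ (v : PySem.Set String), uncov v = u →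
    ∀ (a b : Nat) (c r : List String), u < a → u < b → loopA a c v r = loopA b c v r := by
  induction u using Nat.strong_induction_on with
  | _ u ih =>
    intro v hu a b c r ha hb
    obtain ⟨a', rfl⟩ : ∃ a', a = a' + 1 := ⟨a - 1, by omega⟩
    obtain ⟨b', rfl⟩ : ∃ b', b = b' + 1 := ⟨b - 1, by omega⟩
    simp only [loopA]
    by_cases hnil : (c.foldl stepA ([], v, r)).1 = []
    · simp [hnil]
    · simp only [hnil, if_false]
      obtain ⟨p, hp⟩ := List.exists_mem_of_ne_nil _ hnil
      have hinv := levelA_inv c v ([], v, r) (fun x hx => hx) (by intro p hp; simp at hp)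
      obtain ⟨hpv, hpv2, hpk⟩ := hinv.2 p hp
      have hdec : uncov (c.foldl stepA ([], v, r)).2.1 < u := by
        rw [← hu]
        unfold uncov
        refine countP_strict ZONE_KEYS _ _ ?_ p hpk (by simpa using hpv) (by simpa using hpv2)
        intro a _ hc
        rcases h2 : PySem.Set.contains v a with _ | _
        · simp
        · exact absurd (by simpa using hinv.1 a h2) (by simpa using hc)
      exact ih _ hdec _ rfl a' b' _ _ (by omega) (by omega)

-- B side: two cutoffs at least as large as every distance in the table give the same filter
lemma filter_md_congr (l : List (String × Int)) (md md' : Int)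
    (hall : ∀ p ∈ l, p.2 ≤ md ∧ p.2 ≤ md') :
    l.filter (fun p => p.2 ≤ md) = l.filter (fun p => p.2 ≤ md') := by
  apply List.filter_congr
  intro p hp
  obtain ⟨h1, h2⟩ := hall p hp
  simp [h1, h2]

-- ===== VERDICT (by name: the statement is the Claim_ definition above) =====
theorem get_adjacent_zones_static_py_spec : Claim_equal_get_adjacent_zones_static_py := by
  intro z md _hdom
  unfold Spec_get_adjacent_zones_static_py get_adjacent_zones_static_py get_adjacent_zones_static_py_alt
  by_cases hz : PySem.Dict.contains ZONE_ADJACENCY z = false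
  · have hb : PySem.Dict.getD BFS_ORDER z [] = ([] : List (String × Int)) := by
      simp [ZONE_ADJACENCY] at hz
      obtain ⟨h1, h2, h3, h4, h5, h6, h7, h8, h9, h10, h11, h12⟩ := hz
      simp [BFS_ORDER, PySem.Dict.getD_eq_get?_getD,
        h1, h2, h3, h4, h5, h6, h7, h8, h9, h10, h11, h12, PySem.Dict.get?]
    simp [hz, hb]
  · have hz' : PySem.Dict.contains ZONE_ADJACENCY z = true := by
      rcases h : PySem.Dict.contains ZONE_ADJACENCY z with _ | _
      · exact absurd h hz
      · rfl
    simp only [hz', Bool.true_eq_false, if_false]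
    have hcases : z = "LIB_ENT" ∨ z = "LAB_101" ∨ z = "LAB_102" ∨ z = "LAB_305" ∨ z = "CAF_01" ∨
        z = "GYM" ∨ z = "HOSTEL_GATE" ∨ z = "ADMIN_LOBBY" ∨ z = "AUDITORIUM" ∨ z = "SEM_01" ∨
        z = "ROOM_A1" ∨ z = "ROOM_A2" := by
      simp [ZONE_ADJACENCY] at hz'; tauto
    rcases (by omega : md ≤ 15 ∨ 15 < md) with h15 | h16
    · rcases (by omega : md ≤ 0 ∨ 0 < md) with h0 | hpos
      · -- max_distance ≤ 0: A runs zero levels, B's filter rejects every entry (all distances ≥ 1)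
        rw [Int.toNat_of_nonpos h0]
        have hb : (PySem.Dict.getD BFS_ORDER z []).filter (fun p => p.2 ≤ md) = [] := by
          rw [List.filter_eq_nil_iff]
          intro p hp
          have h1 : (1 : Int) ≤ p.2 := by
            rcases hcases with rfl | rfl | rfl | rfl | rfl | rfl | rfl | rfl | rfl | rfl | rfl | rfl <;>
              simp [BFS_ORDER, PySem.Dict.getD_eq_get?_getD, PySem.Dict.get?_mk_cons] at hp <;>
              rcases hp with ⟨_, rfl⟩ | ⟨_, rfl⟩ | ⟨_, rfl⟩ | ⟨_, rfl⟩ | ⟨_, rfl⟩ | ⟨_, rfl⟩ |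
                ⟨_, rfl⟩ | ⟨_, rfl⟩ | ⟨_, rfl⟩ | ⟨_, rfl⟩ | ⟨_, rfl⟩ <;> norm_num
          simp; omega
        simp [loopA, hb]
      · -- 1 ≤ md ≤ 15: finitely many concrete instances
        rcases hcases with rfl | rfl | rfl | rfl | rfl | rfl | rfl | rfl | rfl | rfl | rfl | rfl <;>
          interval_cases md <;> decide
    · -- md ≥ 16: A has stabilised, and B's filter keeps the whole table row
      have hA : loopA md.toNat [z] (PySem.Set.ofList [z]) [] =
          loopA 16 [z] (PySem.Set.ofList [z]) [] := by
        have hu : uncov (PySem.Set.ofList [z]) ≤ 12 := by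
          unfold uncov
          calc _ ≤ ZONE_KEYS.length := List.countP_le_length
            _ = 12 := by decide
        apply loopA_fuel_congr (uncov (PySem.Set.ofList [z])) _ rfl
        · omega
        · omega
      have hB : (PySem.Dict.getD BFS_ORDER z []).filter (fun p => p.2 ≤ md) =
          (PySem.Dict.getD BFS_ORDER z []).filter (fun p => p.2 ≤ 16) := by
        apply filter_md_congr
        intro p hp
        have h5 : p.2 ≤ 5 := by
          rcases hcases with rfl | rfl | rfl | rfl | rfl | rfl | rfl | rfl | rfl | rfl | rfl | rfl <;>
            simp [BFS_ORDER, PySem.Dict.getD_eq_get?_getD, PySem.Dict.get?_mk_cons] at hp <;>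
            rcases hp with ⟨_, rfl⟩ | ⟨_, rfl⟩ | ⟨_, rfl⟩ | ⟨_, rfl⟩ | ⟨_, rfl⟩ | ⟨_, rfl⟩ |
              ⟨_, rfl⟩ | ⟨_, rfl⟩ | ⟨_, rfl⟩ | ⟨_, rfl⟩ | ⟨_, rfl⟩ <;> norm_num
        omega
      rw [hA, hB]
      rcases hcases with rfl | rfl | rfl | rfl | rfl | rfl | rfl | rfl | rfl | rfl | rfl | rfl <;>
        decide
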